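-- pv_equiv track=rewrite | github.com/veeral-patel/leetcode-samples | topological_sort.py | compute_out_degrees
-- ===== SOURCE A (Python) =====
-- def compute_out_degrees(nodes, edges):
--     out_degrees = {}
--     for node in nodes:
--         out_degrees[node] = 0
--
--     for node in nodes:
--         for edge in edges:
--             if edge[0] == node:
--                 out_degrees[node] += 1
--
--     return out_degrees
-- ===== SOURCE B (Python) =====
-- def compute_out_degrees(nodes, edges):
--     counts = {}
--     for edge in edges:
--         counts[edge[0]] = counts.get(edge[0], 0) + 1
--     return {node: counts.get(node, 0) for node in nodes}
-- ===== Notes on version B (the rewrite author's own statement) =====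
-- stated objective: alternative
-- what changed: Replaces the per-node scan of the whole edge list (O(V*E)) by a single counting pass over the edges followed by one lookup per node (O(V+E)).
-- intended difference: When a node occurs several times in nodes and has at least one outgoing edge, A returns its out-degree multiplied by its multiplicity in nodes (each duplicate occurrence re-scans the edges into the same dict key); B returns the actual out-degree, which is the intended value. — e.g. on compute_out_degrees([1, 1], [(1, 2)]): A returns [(1, 2)], B returns [(1, 1)]
import Mathlib
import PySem

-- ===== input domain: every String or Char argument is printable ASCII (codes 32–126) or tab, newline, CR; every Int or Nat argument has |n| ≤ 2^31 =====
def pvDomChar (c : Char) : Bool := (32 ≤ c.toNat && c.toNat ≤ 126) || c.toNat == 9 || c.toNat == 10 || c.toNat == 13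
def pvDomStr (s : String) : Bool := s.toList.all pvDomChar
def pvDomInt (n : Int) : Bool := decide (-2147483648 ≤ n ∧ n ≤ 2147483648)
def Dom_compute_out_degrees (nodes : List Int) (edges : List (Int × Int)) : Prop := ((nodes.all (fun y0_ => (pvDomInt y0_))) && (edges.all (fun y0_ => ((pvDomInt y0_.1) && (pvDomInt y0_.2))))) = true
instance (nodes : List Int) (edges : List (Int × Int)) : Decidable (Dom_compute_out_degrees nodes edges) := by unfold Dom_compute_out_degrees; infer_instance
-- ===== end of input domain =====

-- B replaces A's per-node scan of all edges (O(V*E)) by one counting pass over the edges plus one lookup per node; on node lists with a duplicated edge-source A multiplies that node's out-degree by its multiplicity — B returns the actual out-degree (see D_ below).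


-- ===== PORT A =====
-- out_degrees[node] += 1 is ported as modify with default 0; the key is always present (set up by the first loop), so this is exact.
def compute_out_degrees (nodes : List Int) (edges : List (Int × Int)) : List (Int × Int) :=
  let d0 : PySem.Dict Int Int := nodes.foldl (fun d node => d.insert node 0) PySem.Dict.empty
  let d := nodes.foldl (fun d node =>
    edges.foldl (fun d edge => if edge.1 == node then d.modify node 0 (· + 1) else d) d) d0
  d.items

-- ===== PORT B =====
def compute_out_degrees_alt (nodes : List Int) (edges : List (Int × Int)) : List (Int × Int) :=
  let counts : PySem.Dict Int Int := edges.foldl (fun d edge => d.insert edge.1 (d.getD edge.1 0 + 1)) PySem.Dict.empty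
  let res : PySem.Dict Int Int := nodes.foldl (fun d node => d.insert node (counts.getD node 0)) PySem.Dict.empty
  res.items

-- ===== PRECONDITION & SPEC =====
-- When a node occurs several times in nodes and has at least one outgoing edge, A returns its out-degree
-- multiplied by its multiplicity in nodes (each duplicate occurrence re-scans the edges into the same dict key);
-- B returns the actual out-degree, which is the intended value.
def D_compute_out_degrees (nodes : List Int) (edges : List (Int × Int)) : Prop :=
  ∃ n ∈ nodes, 2 ≤ nodes.count n ∧ 0 < edges.countP (fun e => e.1 == n)
instance (nodes : List Int) (edges : List (Int × Int)) : Decidable (D_compute_out_degrees nodes edges) := by unfold D_compute_out_degrees; infer_instance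

def Spec_compute_out_degrees (nodes : List Int) (edges : List (Int × Int)) (out : List (Int × Int)) : Prop := ¬ D_compute_out_degrees nodes edges → out = compute_out_degrees_alt nodes edges
instance (nodes : List Int) (edges : List (Int × Int)) (out : List (Int × Int)) : Decidable (Spec_compute_out_degrees nodes edges out) := by unfold Spec_compute_out_degrees; infer_instance

def pvDiffWitness_compute_out_degrees : List Int × (List (Int × Int)) := ([1, 1], [(1, 2)])
def pvDiffWitnessOut_compute_out_degrees : (List (Int × Int)) × (List (Int × Int)) := ([(1, 2)], [(1, 1)])

-- ===== CLAIM (what is proved, stated in full; the proofs are below) =====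
def Claim_unchanged_compute_out_degrees : Prop := ∀ (nodes : List Int) (edges : List (Int × Int)), Dom_compute_out_degrees nodes edges → Spec_compute_out_degrees nodes edges (compute_out_degrees nodes edges)
def Claim_changed_compute_out_degrees : Prop := Dom_compute_out_degrees (pvDiffWitness_compute_out_degrees.1) (pvDiffWitness_compute_out_degrees.2) ∧ D_compute_out_degrees (pvDiffWitness_compute_out_degrees.1) (pvDiffWitness_compute_out_degrees.2) ∧ compute_out_degrees (pvDiffWitness_compute_out_degrees.1) (pvDiffWitness_compute_out_degrees.2) = pvDiffWitnessOut_compute_out_degrees.1 ∧ compute_out_degrees_alt (pvDiffWitness_compute_out_degrees.1) (pvDiffWitness_compute_out_degrees.2) = pvDiffWitnessOut_compute_out_degrees.2 ∧ pvDiffWitnessOut_compute_out_degrees.1 ≠ pvDiffWitnessOut_compute_out_degrees.2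
def Claim_exact_compute_out_degrees : Prop := ∀ (nodes : List Int) (edges : List (Int × Int)), Dom_compute_out_degrees nodes edges → D_compute_out_degrees nodes edges → compute_out_degrees nodes edges ≠ compute_out_degrees_alt nodes edges

-- ===== LEMMAS AND PROOFS =====

-- A's init loop: every value is 0
lemma getD_init (nodes : List Int) (d : PySem.Dict Int Int) (k : Int) (h : d.getD k 0 = 0) :
    (nodes.foldl (fun d node => d.insert node 0) d).getD k 0 = 0 := by
  induction nodes generalizing d with
  | nil => exact h
  | cons n rest ih =>
      simp only [List.foldl_cons]
      apply ih
      rw [PySem.Dict.getD_insert]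
      split_ifs <;> simp [h]

-- A's init loop: keys are the distinct nodes in order
lemma keys_init (nodes : List Int) :
    (nodes.foldl (fun d node => d.insert node 0) (PySem.Dict.empty : PySem.Dict Int Int)).keys
      = PySem.Set.ofList nodes := by
  rw [PySem.Dict.keys_foldl_insert (f := fun _ _ => 0)]
  rw [PySem.Dict.keys_empty, PySem.Set.update_nil_left]

-- A's inner loop adds the n-source count of the edge list at key n and leaves other keys alone
lemma A_inner_getD (edges : List (Int × Int)) (d : PySem.Dict Int Int) (n k : Int) :
    (edges.foldl (fun d edge => if edge.1 == n then d.modify n 0 (· + 1) else d) d).getD k 0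
      = d.getD k 0 + if k = n then (edges.countP (fun e => e.1 == n) : Int) else 0 := by
  induction edges generalizing d with
  | nil => simp
  | cons e rest ih =>
      simp only [List.foldl_cons, List.countP_cons]
      by_cases he : (e.1 == n) = true
      · rw [if_pos he, ih, PySem.Dict.getD_modify]
        simp only [he, if_true]
        split_ifs with hk
        · subst hk; push_cast; ring
        · ring
      · rw [if_neg he, ih, if_neg he]
        simp

-- A's inner loop does not change the key list (the key n is present)
lemma A_inner_keys (edges : List (Int × Int)) (d : PySem.Dict Int Int) (n : Int)
    (h : d.contains n = true) :
    (edges.foldl (fun d edge => if edge.1 == n then d.modify n 0 (· + 1) else d) d).keys = d.keys := by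
  induction edges generalizing d with
  | nil => rfl
  | cons e rest ih =>
      simp only [List.foldl_cons]
      by_cases he : (e.1 == n) = true
      · simp only [he, if_true]
        have hc : (d.modify n 0 (· + 1)).contains n = true := by
          rw [PySem.Dict.contains_modify]; simp
        rw [ih _ hc, PySem.Dict.keys_modify, PySem.Dict.keys_insert_of_contains _ _ h]
      · rw [if_neg he, ih _ h]

-- A's outer loop: every occurrence of k in nodes adds the k-source count of the edge list
lemma A_outer_getD (nodes : List Int) (edges : List (Int × Int)) (d : PySem.Dict Int Int) (k : Int) :
    (nodes.foldl (fun d node =>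
        edges.foldl (fun d edge => if edge.1 == node then d.modify node 0 (· + 1) else d) d) d).getD k 0
      = d.getD k 0 + (nodes.count k : Int) * (edges.countP (fun e => e.1 == k) : Int) := by
  induction nodes generalizing d with
  | nil => simp
  | cons n rest ih =>
      simp only [List.foldl_cons, List.count_cons]
      rw [ih, A_inner_getD]
      by_cases h : k = n
      · subst h; simp only [beq_self_eq_true, if_true]
        push_cast; ring
      · have : (n == k) = false := beq_eq_false_iff_ne.mpr (fun he => h he.symm)
        rw [if_neg h, this]
        push_cast; ring

-- A's outer loop does not change the key list (all nodes are present as keys)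
lemma A_outer_keys (nodes : List Int) (edges : List (Int × Int)) (d : PySem.Dict Int Int)
    (H : ∀ x ∈ nodes, d.contains x = true) :
    (nodes.foldl (fun d node =>
        edges.foldl (fun d edge => if edge.1 == node then d.modify node 0 (· + 1) else d) d) d).keys = d.keys := by
  induction nodes generalizing d with
  | nil => rfl
  | cons n rest ih =>
      simp only [List.foldl_cons]
      have hkeys := A_inner_keys edges d n (H n (List.mem_cons_self ..))
      rw [ih _ (fun x hx => by
        rw [PySem.Dict.contains_iff_mem_keys, hkeys, ← PySem.Dict.contains_iff_mem_keys]
        exact H x (List.mem_cons_of_mem _ hx)), hkeys]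

-- B's counting loop counts the edges out of k
lemma B_src_getD (edges : List (Int × Int)) (d : PySem.Dict Int Int) (k : Int) :
    (edges.foldl (fun d edge => d.insert edge.1 (d.getD edge.1 0 + 1)) d).getD k 0
      = d.getD k 0 + (edges.countP (fun e => e.1 == k) : Int) := by
  induction edges generalizing d with
  | nil => simp
  | cons e rest ih =>
      simp only [List.foldl_cons, List.countP_cons, ih, PySem.Dict.getD_insert]
      by_cases h : k = e.1
      · subst h; simp only [beq_self_eq_true, if_true]
        push_cast; ring
      · have : (e.1 == k) = false := beq_eq_false_iff_ne.mpr (fun he => h he.symm)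
        rw [if_neg h, this]
        simp

-- a fold of keyed inserts leaves an unlisted key alone
lemma B_comp_not_mem (xs : List Int) (f : Int → Int) (d : PySem.Dict Int Int) (k : Int)
    (h : k ∉ xs) :
    (xs.foldl (fun d n => d.insert n (f n)) d).getD k 0 = d.getD k 0 := by
  induction xs generalizing d with
  | nil => rfl
  | cons m rest ih =>
      simp only [List.foldl_cons]
      rw [ih _ (fun hr => h (List.mem_cons_of_mem _ hr)),
          PySem.Dict.getD_insert, if_neg (by intro he; subst he; exact h (List.mem_cons_self ..))]

-- B's comprehension loop: the value at a listed key is its (key-determined) inserted value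
lemma B_comp_getD (nodes : List Int) (f : Int → Int) (d : PySem.Dict Int Int) (k : Int)
    (hk : k ∈ nodes) :
    (nodes.foldl (fun d n => d.insert n (f n)) d).getD k 0 = f k := by
  induction nodes generalizing d with
  | nil => cases hk
  | cons n rest ih =>
      simp only [List.foldl_cons]
      by_cases h : k ∈ rest
      · exact ih _ h
      · have hkn : k = n := by
          rcases List.mem_cons.mp hk with h' | h'
          · exact h'
          · exact absurd h' h
        subst hkn
        rw [B_comp_not_mem _ _ _ _ h, PySem.Dict.getD_insert_self]

-- both results are the map over the distinct nodes of their respective per-key values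
lemma both_as_maps (nodes : List Int) (edges : List (Int × Int)) :
    compute_out_degrees nodes edges
        = (PySem.Set.ofList nodes).map (fun k =>
            (k, (nodes.count k : Int) * (edges.countP (fun e => e.1 == k) : Int)))
      ∧ compute_out_degrees_alt nodes edges
        = (PySem.Set.ofList nodes).map (fun k =>
            (k, (edges.countP (fun e => e.1 == k) : Int))) := by
  unfold compute_out_degrees compute_out_degrees_alt
  simp only []
  set d0 : PySem.Dict Int Int := nodes.foldl (fun d node => d.insert node 0) PySem.Dict.empty with hd0
  set counts : PySem.Dict Int Int := edges.foldl (fun d edge => d.insert edge.1 (d.getD edge.1 0 + 1)) PySem.Dict.empty with hcounts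
  have hkeys0 : d0.keys = PySem.Set.ofList nodes := keys_init nodes
  have hcont : ∀ x ∈ nodes, d0.contains x = true := fun x hx => by
    rw [PySem.Dict.contains_iff_mem_keys, hkeys0]
    exact (PySem.Set.mem_ofList _ _).mpr hx
  have hkA : (nodes.foldl (fun d node =>
      edges.foldl (fun d edge => if edge.1 == node then d.modify node 0 (· + 1) else d) d) d0).keys
        = PySem.Set.ofList nodes := by
    rw [A_outer_keys _ _ _ hcont, hkeys0]
  have hkB : (nodes.foldl (fun d node => d.insert node (counts.getD node 0))
      (PySem.Dict.empty : PySem.Dict Int Int)).keys = PySem.Set.ofList nodes := by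
    rw [PySem.Dict.keys_foldl_insert (f := fun _ node => counts.getD node 0)]
    rw [PySem.Dict.keys_empty, PySem.Set.update_nil_left]
  constructor
  · rw [PySem.Dict.items_eq_map_keys _ (by rw [hkA]; exact PySem.Set.nodup_ofList nodes) 0, hkA]
    refine List.map_congr_left (fun k hk => ?_)
    rw [A_outer_getD, getD_init _ _ _ (PySem.Dict.getD_empty ..)]
    simp
  · rw [PySem.Dict.items_eq_map_keys _ (by rw [hkB]; exact PySem.Set.nodup_ofList nodes) 0, hkB]
    refine List.map_congr_left (fun k hk => ?_)
    have hkmem : k ∈ nodes := (PySem.Set.mem_ofList _ _).mp hk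
    rw [B_comp_getD _ _ _ _ hkmem, hcounts, B_src_getD]
    simp

-- ===== VERDICT (by name: the statement is the Claim_ definition above) =====
theorem compute_out_degrees_spec : Claim_unchanged_compute_out_degrees := by
  intro nodes edges _ hnD
  obtain ⟨hA, hB⟩ := both_as_maps nodes edges
  rw [hA, hB]
  refine List.map_congr_left (fun k hk => ?_)
  have hkmem : k ∈ nodes := (PySem.Set.mem_ofList _ _).mp hk
  have hnotboth : ¬ (2 ≤ nodes.count k ∧ 0 < edges.countP (fun e => e.1 == k)) :=
    fun h => hnD ⟨k, hkmem, h⟩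
  have hone : 1 ≤ nodes.count k := List.one_le_count_iff.mpr hkmem
  by_cases hc : edges.countP (fun e => e.1 == k) = 0
  · simp [hc]
  · have h2 : ¬ 2 ≤ nodes.count k := fun h => hnotboth ⟨h, Nat.pos_of_ne_zero hc⟩
    have : nodes.count k = 1 := by omega
    simp [this]

theorem compute_out_degrees_changed : Claim_changed_compute_out_degrees := by
  unfold Claim_changed_compute_out_degrees; decide

theorem compute_out_degrees_tight : Claim_exact_compute_out_degrees := by
  intro nodes edges _ hD heq
  obtain ⟨n, hn, hcount, hc⟩ := hD
  obtain ⟨hA, hB⟩ := both_as_maps nodes edges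
  rw [hA, hB] at heq
  have hmem : n ∈ PySem.Set.ofList nodes := (PySem.Set.mem_ofList _ _).mpr hn
  have := (List.map_inj_left.mp heq) n hmem
  have hvals : (nodes.count n : Int) * (edges.countP (fun e => e.1 == n) : Int)
      = (edges.countP (fun e => e.1 == n) : Int) := congrArg Prod.snd this
  have hcpos : (0 : Int) < (edges.countP (fun e => e.1 == n) : Int) := by exact_mod_cast hc
  have h2 : (2 : Int) ≤ (nodes.count n : Int) := by exact_mod_cast hcount
  nlinarith
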